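-- pv_equiv track=rewrite | github.com/Vikrantc083/CS666-Hardware-Security-For-Internet-Of-Things | Assignment 3/Q2_Group2.py | batoi
-- ===== SOURCE A (Python) =====
-- def batoi(by):
--     byt=[]
--     for i in range(len(by[0])):
--         byt.append(int(by[0][i]))                                     #Binary array to int
--     byt=byt[::-1]
--     intt=0
--     for i in range(len(byt)):
--         intt=intt+(int(byt[i])*(2**i))
--     return(intt)
-- ===== SOURCE B (Python) =====
-- def batoi(by):
--     intt = 0
--     for d in by[0]:
--         intt = intt * 2 + int(d)
--     return intt
-- ===== Notes on version B (the rewrite author's own statement) =====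
-- stated objective: simpler
-- what changed: Replaces the build-list/reverse/sum-of-powers-of-two scheme with a single Horner multiply-accumulate pass over the digits in original order.
import Mathlib
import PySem

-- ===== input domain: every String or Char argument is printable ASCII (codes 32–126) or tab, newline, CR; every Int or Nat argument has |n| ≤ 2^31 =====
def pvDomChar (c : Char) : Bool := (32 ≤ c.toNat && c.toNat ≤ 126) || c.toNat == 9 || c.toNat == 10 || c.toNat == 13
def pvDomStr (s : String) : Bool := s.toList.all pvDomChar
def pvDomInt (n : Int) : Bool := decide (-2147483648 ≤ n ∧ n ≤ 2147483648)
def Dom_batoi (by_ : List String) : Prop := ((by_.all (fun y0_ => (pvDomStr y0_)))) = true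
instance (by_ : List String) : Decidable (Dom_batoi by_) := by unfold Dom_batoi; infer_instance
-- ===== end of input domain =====

-- B replaces A's build-list/reverse/sum-of-2^i scheme by a single Horner multiply-accumulate pass (simpler).


-- int(d) for a one-character string d; exact under Pre_ (digit chars, where int() returns)
def pvDigitInt (c : Char) : Int := (PySem.Int.ofChars? [c]).getD 0

-- ===== PORT A =====
def batoi (by_ : List String) : Int :=
  -- by[0]; exact under Pre_ (by_ nonempty)
  let s := ((PySem.List.pyGet? by_ 0).getD "").toList
  -- byt = []; for i in range(len(by[0])): byt.append(int(by[0][i]))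
  let byt : List Int := (PySem.List.pyRange 0 s.length 1).foldl
    (fun acc i => acc ++ [pvDigitInt (PySem.List.pyGetD s i ' ')]) []
  -- byt = byt[::-1]
  let byt := (PySem.List.slice? byt none none (-1)).getD []
  -- intt = 0; for i in range(len(byt)): intt = intt + int(byt[i]) * 2**i
  (PySem.List.pyRange 0 byt.length 1).foldl
    (fun intt i => intt + (PySem.List.pyGetD byt i 0) * 2 ^ i.toNat) 0

-- ===== PORT B =====
def batoi_alt (by_ : List String) : Int :=
  match by_ with
  | [] => 0   -- by[0] raises here; outside Pre_
  | s :: _ => s.toList.foldl (fun intt d => intt * 2 + pvDigitInt d) 0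

-- ===== PRECONDITION & SPEC =====
-- Pre_ excludes the empty list (by[0] raises IndexError) and non-digit characters in by[0]
-- (int(d) raises ValueError there); A returns on no input outside Pre_.
def Pre_batoi (by_ : List String) : Prop :=
  by_ ≠ [] ∧ ((by_.headI).toList.all PySem.Chars.isdigit) = true
instance (by_ : List String) : Decidable (Pre_batoi by_) := by unfold Pre_batoi; infer_instance
def pvWitness_batoi : List String := ["1"]

def Spec_batoi (by_ : List String) (out : Int) : Prop := out = batoi_alt by_
instance (by_ : List String) (out : Int) : Decidable (Spec_batoi by_ out) := by unfold Spec_batoi; infer_instance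

-- ===== CLAIM (what is proved, stated in full; the proofs are below) =====
def Claim_equal_batoi : Prop := ∀ (by_ : List String), Dom_batoi by_ → Pre_batoi by_ → Spec_batoi by_ (batoi by_)

-- ===== LEMMAS AND PROOFS =====

-- the append loop builds acc0 ++ map
theorem pv_foldl_append_map {α β : Type} (l : List α) (g : α → β) (acc0 : List β) :
    l.foldl (fun acc i => acc ++ [g i]) acc0 = acc0 ++ l.map g := by
  induction l generalizing acc0 with
  | nil => simp
  | cons x xs ih => simp [List.foldl, ih]

-- an index loop reading a list positionwise is a map over the list
theorem pv_map_g_pyGetD {α β : Type} (xs : List α) (d : α) (g : α → β) :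
    (PySem.List.pyRange 0 (xs.length : Int) 1).map (fun i => g (PySem.List.pyGetD xs i d))
      = xs.map g := by
  have h := PySem.List.map_pyGetD_pyRange_zero xs d
  calc (PySem.List.pyRange 0 (xs.length : Int) 1).map (fun i => g (PySem.List.pyGetD xs i d))
      = ((PySem.List.pyRange 0 (PySem.List.len xs) 1).map
          (fun j => PySem.List.pyGetD xs j d)).map g := by
        rw [List.map_map]; simp [PySem.List.len]
    _ = xs.map g := by rw [h]

-- positional sum over a list equals Horner's rule on its reverse
theorem pv_sum_pow_eq_horner (rs : List Int) :
    ((List.range rs.length).map (fun k => rs.getD k 0 * 2 ^ k)).sum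
      = rs.reverse.foldl (fun a d => a * 2 + d) 0 := by
  induction rs with
  | nil => simp
  | cons r rs ih =>
    have hfold : (rs.reverse ++ [r]).foldl (fun a d => a * 2 + d) 0
        = (rs.reverse.foldl (fun a d => a * 2 + d) 0) * 2 + r := by
      rw [List.foldl_append]; rfl
    rw [List.reverse_cons, hfold, ← ih]
    rw [List.length_cons, List.range_succ_eq_map]
    simp only [List.map_cons, List.map_map, List.sum_cons, List.getD_cons_zero, pow_zero,
      mul_one, Function.comp_def, List.getD_cons_succ]
    have : ∀ k : ℕ, rs.getD k 0 * 2 ^ (k + 1) = (rs.getD k 0 * 2 ^ k) * 2 := by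
      intro k; rw [pow_succ]; ring
    simp only [this, ← List.sum_map_mul_right]
    ring

-- the two ports agree on any nonempty argument list
theorem pv_batoi_eq (s : String) (t : List String) :
    batoi (s :: t) = batoi_alt (s :: t) := by
  unfold batoi batoi_alt
  rw [PySem.List.pyGet?_zero_cons, Option.getD_some]
  dsimp only
  rw [pv_foldl_append_map, List.nil_append,
    pv_map_g_pyGetD s.toList ' ' pvDigitInt,
    PySem.List.slice?_none_none_neg_one, Option.getD_some]
  rw [PySem.List.foldl_add, PySem.List.pyRange_one, List.map_map]
  have hterm : ∀ k : ℕ,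
      ((fun i : Int => PySem.List.pyGetD (s.toList.map pvDigitInt).reverse i 0 * 2 ^ i.toNat) ∘
        (fun k : ℕ => (0 : Int) + k)) k
      = (s.toList.map pvDigitInt).reverse.getD k 0 * 2 ^ k := by
    intro k
    simp only [Function.comp_def, Int.zero_add, PySem.List.pyGetD_natCast, Int.toNat_natCast]
  rw [List.map_congr_left (fun k _ => hterm k)]
  have hlen : ((((s.toList.map pvDigitInt).reverse.length : Int)) - 0).toNat
      = (s.toList.map pvDigitInt).reverse.length := by simp
  rw [hlen, pv_sum_pow_eq_horner, List.reverse_reverse, zero_add, List.foldl_map]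

-- ===== VERDICT (by name: the statement is the Claim_ definition above) =====
theorem batoi_spec : Claim_equal_batoi := by
  intro by_ _ hpre
  unfold Spec_batoi
  cases by_ with
  | nil => exact absurd rfl hpre.1
  | cons s t => exact pv_batoi_eq s t
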